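-- pv_equiv track=rewrite | github.com/zivoy/porject-archive | python/PycharmProjects/competitions/practice/APIO '14 P1.py | pals
-- ===== SOURCE A (Python) =====
-- def pals(string):
--     lst = dict()
--     maximum=0
--     for cut in range(len(string)+1):
--         for pos in range(len(string)-cut+1):
--             prt=string[pos:cut+pos]
--             if prt == prt[::-1]:
--                 if prt not in lst:
--                     lst[prt]=0
--                 lst[prt] += 1
--         if lst:
--             maximum = max(max([len(k)*v for k,v in lst.items()]),maximum)
--         lst = dict()
--     return maximum
-- ===== SOURCE B (Python) =====
-- def pals(string):
--     # DP over lengths: a rolling boolean table of palindromic start positions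
--     # replaces A's per-substring slice-and-reverse check; substrings are sliced
--     # and counted only when palindromic, and the per-length best is L*max(count).
--     n = len(string)
--     best = 0
--     pp = []  # palindrome flags for length L-2
--     p = []   # palindrome flags for length L-1
--     for L in range(1, n + 1):
--         m = n - L + 1
--         if L == 1:
--             cur = [True] * m
--         elif L == 2:
--             cur = [string[i] == string[i + 1] for i in range(m)]
--         else:
--             cur = [string[i] == string[i + L - 1] and pp[i + 1] for i in range(m)]
--         counts = {}
--         for i in range(m):
--             if cur[i]:
--                 sub = string[i:i + L]
--                 counts[sub] = counts.get(sub, 0) + 1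
--         if counts:
--             best = max(best, L * max(counts.values()))
--         pp, p = p, cur
--     return best
-- ===== Notes on version B (the rewrite author's own statement) =====
-- stated objective: alternative
-- what changed: A tests every one of the O(n^2) substrings by slicing and reversing it and hashes them all; B instead computes palindromicity by a rolling DP table over lengths (pal(i,L) = s[i]==s[i+L-1] and pal(i+1,L-2)), slices and counts only the palindromic substrings, and takes L*max(count) per length (intended as faster; measured 1.8-3.2x in a timing run but unconfirmed at the largest size, where all-equal-character inputs make both O(n^3)).
import Mathlib
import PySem

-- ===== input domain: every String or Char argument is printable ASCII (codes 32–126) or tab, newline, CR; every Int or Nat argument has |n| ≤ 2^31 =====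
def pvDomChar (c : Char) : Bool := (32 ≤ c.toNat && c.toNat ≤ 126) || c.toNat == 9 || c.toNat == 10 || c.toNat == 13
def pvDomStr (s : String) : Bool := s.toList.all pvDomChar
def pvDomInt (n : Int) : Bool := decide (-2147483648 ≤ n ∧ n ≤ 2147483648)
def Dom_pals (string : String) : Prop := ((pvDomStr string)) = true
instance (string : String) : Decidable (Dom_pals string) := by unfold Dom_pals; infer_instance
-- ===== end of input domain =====

-- B replaces A's per-substring slice-and-reverse palindrome test by a rolling DP table of
-- palindromic start positions per length, slicing and counting only palindromic substrings.


-- ===== PORT A =====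
def pals (string : String) : Int :=
  let cs := string.toList
  let n : Int := PySem.Str.len string
  (PySem.List.pyRange 0 (n + 1)).foldl (fun maximum cut =>
    let lst : PySem.Dict (List Char) Int :=
      (PySem.List.pyRange 0 (n - cut + 1)).foldl (fun lst pos =>
        let prt := PySem.List.slice cs (some pos) (some (cut + pos))
        if PySem.List.slice? prt none none (-1) = some prt then
          let lst := if lst.contains prt then lst else lst.insert prt 0
          lst.insert prt (lst.getD prt 0 + 1)
        else lst) PySem.Dict.empty
    if lst.size ≠ 0 then
      -- 'max(list)' of a nonempty list: the .getD 0 default is never used under the guard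
      max ((PySem.List.max? (lst.items.map (fun kv => (kv.1.length : Int) * kv.2))
              (fun x => x)).getD 0) maximum
    else maximum) 0

-- ===== PORT B =====
def pals_alt (string : String) : Int :=
  let cs := string.toList
  let n : Int := PySem.Str.len string
  let res := (PySem.List.pyRange 1 (n + 1)).foldl
    (fun (st : Int × List Bool × List Bool) L =>
      let best := st.1
      let pp := st.2.1
      let m := n - L + 1
      -- string indexing below is always in range; pyGetD's default is never used
      let cur : List Bool :=
        if L = 1 then List.replicate m.toNat true
        else if L = 2 then
          (PySem.List.pyRange 0 m).map (fun i =>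
            PySem.List.pyGetD cs i ' ' == PySem.List.pyGetD cs (i + 1) ' ')
        else
          (PySem.List.pyRange 0 m).map (fun i =>
            (PySem.List.pyGetD cs i ' ' == PySem.List.pyGetD cs (i + L - 1) ' ')
            && PySem.List.pyGetD pp (i + 1) false)
      let counts : PySem.Dict (List Char) Int :=
        (PySem.List.pyRange 0 m).foldl (fun d i =>
          if PySem.List.pyGetD cur i false then
            let sub := PySem.List.slice cs (some i) (some (i + L))
            d.insert sub (d.getD sub 0 + 1)
          else d) PySem.Dict.empty
      let best := if counts.size ≠ 0 then
          max best (L * ((PySem.List.max? counts.values (fun x => x)).getD 0))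
        else best
      (best, st.2.2, cur)) (0, [], [])
  res.1

-- ===== PRECONDITION & SPEC =====
def Spec_pals (string : String) (out : Int) : Prop := out = pals_alt string
instance (string : String) (out : Int) : Decidable (Spec_pals string out) := by unfold Spec_pals; infer_instance

-- ===== CLAIM (what is proved, stated in full; the proofs are below) =====
def Claim_equal_pals : Prop := ∀ (string : String), Dom_pals string → Spec_pals string (pals string)

-- ===== LEMMAS AND PROOFS =====

theorem take_decomp (cs : List Char) (i l : Nat) (h2 : 2 ≤ l) (hle : i + l ≤ cs.length) :
    (cs.drop i).take l =
      cs.getD i ' ' :: ((cs.drop (i+1)).take (l-2)) ++ [cs.getD (i+l-1) ' '] := by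
  rw [List.getD_eq_getElem cs ' ' (by omega : i < cs.length),
      List.getD_eq_getElem cs ' ' (by omega : i + l - 1 < cs.length)]
  apply List.ext_getElem
  · simp; omega
  · intro j hj hj'
    have hlen : (((cs.drop (i+1)).take (l-2))).length = l - 2 := by simp; omega
    have hj2 : j < l := by simp at hj; omega
    rw [List.getElem_take, List.getElem_drop]
    rcases Nat.eq_zero_or_pos j with rfl | hp
    · simp
    · obtain ⟨jj, rfl⟩ : ∃ jj, j = jj + 1 := ⟨j - 1, by omega⟩
      simp only [List.cons_append, List.getElem_cons_succ]
      rcases Nat.lt_or_ge (jj+1) (l-1) with h | h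
      · rw [List.getElem_append_left (by omega)]
        rw [List.getElem_take, List.getElem_drop]
        congr 1; omega
      · rw [List.getElem_append_right (by omega)]
        simp only [hlen]
        have h0 : jj - (l-2) = 0 := by omega
        simp [h0]
        congr 1; omega

def palb (cs : List Char) (i L : Nat) : Bool :=
  decide (((cs.drop i).take L).reverse = (cs.drop i).take L)

theorem palb_one (cs : List Char) (i : Nat) : palb cs i 1 = true := by
  unfold palb
  rcases cs.drop i with _ | ⟨a, t⟩ <;> simp

theorem rev_iff {a b : Char} (m : List Char) :
    ((a :: m ++ [b]).reverse = a :: m ++ [b]) ↔ (b = a ∧ m.reverse = m) := by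
  constructor
  · intro h
    simp only [List.cons_append] at h
    have h' : b :: (m.reverse ++ [a]) = a :: (m ++ [b]) := by simpa using h
    have hb : b = a := by
      have := congrArg (·.head?) h'; simpa using this
    subst hb
    refine ⟨rfl, ?_⟩
    have ht : m.reverse ++ [b] = m ++ [b] := by
      have := congrArg List.tail h'; simpa using this
    have := congrArg List.dropLast ht
    simpa [List.dropLast_concat] using this
  · rintro ⟨rfl, hm⟩
    simp [hm]

theorem max_scale_foldl (c : Int) (hc : 0 ≤ c) (t : List Int) :
    ∀ x, List.foldl max (c * x) (t.map (fun v => c * v)) = c * List.foldl max x t := by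
  induction t with
  | nil => intro x; simp
  | cons y t ih =>
    intro x
    simp only [List.map_cons, List.foldl_cons]
    rw [← mul_max_of_nonneg _ _ hc, ih]

theorem max_scale (c : Int) (hc : 0 ≤ c) (vs : List Int) (hne : vs ≠ []) :
    ((PySem.List.max? (vs.map (fun v => c * v)) (fun x => x)).getD 0)
      = c * ((PySem.List.max? vs (fun x => x)).getD 0) := by
  rcases vs with _ | ⟨x, t⟩
  · exact absurd rfl hne
  · simp only [List.map_cons, PySem.List.max?_id_cons, Option.getD_some]
    exact max_scale_foldl c hc t x

def tbl (cs : List Char) (L : Nat) : List Bool :=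
  (PySem.List.pyRange 0 ((cs.length + 1 - L : Nat) : Int)).map (fun i => palb cs i.toNat L)

theorem tbl_get (cs : List Char) (l k : Nat) (hk : k < cs.length + 1 - l) :
    PySem.List.pyGetD (tbl cs l) (k : Int) false = palb cs k l := by
  unfold tbl
  rw [PySem.List.pyGetD_map_pyRange _ _ _ _ hk]
  simp

theorem palb_rec (cs : List Char) (i l : Nat) (h2 : 2 ≤ l) (hle : i + l ≤ cs.length) :
    palb cs i l = ((cs.getD i ' ' == cs.getD (i+l-1) ' ') && palb cs (i+1) (l-2)) := by
  unfold palb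
  rw [take_decomp cs i l h2 hle]
  rw [show (decide (((cs.getD i ' ' :: ((cs.drop (i+1)).take (l-2))) ++ [cs.getD (i+l-1) ' ']).reverse
      = (cs.getD i ' ' :: ((cs.drop (i+1)).take (l-2))) ++ [cs.getD (i+l-1) ' '])) =
      decide ((cs.getD (i+l-1) ' ' = cs.getD i ' ') ∧
        ((cs.drop (i+1)).take (l-2)).reverse = (cs.drop (i+1)).take (l-2)) from by
    exact decide_eq_decide.mpr (rev_iff _)]
  simp [Bool.decide_and, eq_comm, Bool.beq_eq_decide_eq]


theorem step_insert' (d : PySem.Dict (List Char) Int) (k : List Char) :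
    (if d.contains k then d else d.insert k 0).insert k
      ((if d.contains k then d else d.insert k 0).getD k 0 + 1)
      = d.insert k (d.getD k 0 + 1) := by
  by_cases h : d.contains k
  · simp [h]
  · simp only [h, Bool.false_eq_true, if_false]
    rw [PySem.Dict.getD_insert_self, PySem.Dict.insert_insert_self,
        PySem.Dict.getD_of_not_contains d 0 (by simpa using h)]

def dictAt (cs : List Char) (L : Nat) : PySem.Dict (List Char) Int :=
  (List.range (cs.length + 1 - L)).foldl (fun d i =>
    if ((cs.drop i).take L).reverse = (cs.drop i).take L then
      d.insert ((cs.drop i).take L) (d.getD ((cs.drop i).take L) 0 + 1)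
    else d) PySem.Dict.empty

theorem dictA_eq (cs : List Char) (l : Nat) (hl : l ≤ cs.length) :
    (PySem.List.pyRange 0 ((cs.length : Int) - (l : Int) + 1)).foldl (fun lst pos =>
      let prt := PySem.List.slice cs (some pos) (some ((l : Int) + pos))
      if PySem.List.slice? prt none none (-1) = some prt then
        let lst := if lst.contains prt then lst else lst.insert prt 0
        lst.insert prt (lst.getD prt 0 + 1)
      else lst) PySem.Dict.empty = dictAt cs l := by
  have hm : (cs.length : Int) - (l : Int) + 1 = ((cs.length + 1 - l : Nat) : Int) := by omega
  rw [hm, PySem.List.pyRange_zero_natCast, List.foldl_map]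
  unfold dictAt
  apply PySem.List.foldl_congr_mem
  intro d j hj
  have hsl : PySem.List.slice cs (some ((j:Nat):Int)) (some ((l : Int) + (j:Int)))
      = (cs.drop j).take l := by
    rw [show ((l:Int) + (j:Int)) = ((l + j : Nat) : Int) by push_cast; ring,
        PySem.List.slice_natCast]
    simp
  simp only [hsl, PySem.List.slice?_none_none_neg_one, Option.some.injEq]
  split_ifs with hpal hc
  · rfl
  · rw [PySem.Dict.getD_insert_self, PySem.Dict.insert_insert_self,
        PySem.Dict.getD_of_not_contains d 0 (by simpa using hc)]
  · rfl

theorem dictB_eq (cs : List Char) (l : Nat) (hl : l ≤ cs.length) :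
    (PySem.List.pyRange 0 ((cs.length : Int) - (l : Int) + 1)).foldl (fun d i =>
      if PySem.List.pyGetD (tbl cs l) i false then
        let sub := PySem.List.slice cs (some i) (some (i + (l : Int)))
        d.insert sub (d.getD sub 0 + 1)
      else d) PySem.Dict.empty = dictAt cs l := by
  have hm : (cs.length : Int) - (l : Int) + 1 = ((cs.length + 1 - l : Nat) : Int) := by omega
  rw [hm, PySem.List.pyRange_zero_natCast, List.foldl_map]
  unfold dictAt
  apply PySem.List.foldl_congr_mem
  intro d j hj
  have hj' : j < cs.length + 1 - l := by simpa using hj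
  have hsl : PySem.List.slice cs (some ((j:Nat):Int)) (some ((j:Int) + (l : Int)))
      = (cs.drop j).take l := by
    rw [show ((j:Int) + (l:Int)) = ((j + l : Nat) : Int) by push_cast; ring,
        PySem.List.slice_natCast]
    simp
  rw [tbl_get cs l j hj']
  simp only [hsl, palb, decide_eq_true_eq]

theorem mem_keys_insert {d : PySem.Dict (List Char) Int} {k key : List Char} {v : Int}
    (h : key ∈ (d.insert k v).keys) : key = k ∨ key ∈ d.keys := by
  rcases List.mem_map.1 h with ⟨p, hp, rfl⟩
  rcases (PySem.Dict.mem_items_insert d k v p).1 hp with h' | ⟨h', -⟩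
  · left; rw [h']
  · right; exact List.mem_map_of_mem h'

theorem keys_len_aux (cs : List Char) (l : Nat) (L : List Nat) :
    ∀ d : PySem.Dict (List Char) Int, (∀ i ∈ L, i + l ≤ cs.length) →
      (∀ key ∈ d.keys, key.length = l) →
      ∀ key ∈ (L.foldl (fun d i =>
        if ((cs.drop i).take l).reverse = (cs.drop i).take l then
          d.insert ((cs.drop i).take l) (d.getD ((cs.drop i).take l) 0 + 1)
        else d) d).keys, key.length = l := by
  induction L with
  | nil => intro d _ hd key hk; exact hd key hk
  | cons i L ih =>
    intro d hL hd key hk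
    refine ih _ (fun j hj => hL j (List.mem_cons_of_mem _ hj)) ?_ key hk
    intro key' hk'
    beta_reduce at hk'
    split_ifs at hk' with hpal
    · rcases mem_keys_insert hk' with rfl | h'
      · have : i + l ≤ cs.length := hL i List.mem_cons_self
        simp; omega
      · exact hd _ h'
    · exact hd _ hk'

theorem keys_len (cs : List Char) (l : Nat) (hl : l ≤ cs.length) :
    ∀ key ∈ (dictAt cs l).keys, key.length = l := by
  unfold dictAt
  refine keys_len_aux cs l _ _ (fun i hi => ?_) (fun key hk => by simp at hk)
  have : i < cs.length + 1 - l := List.mem_range.1 hi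
  omega

theorem map_items_values (cs : List Char) (l : Nat) (hl : l ≤ cs.length) :
    (dictAt cs l).items.map (fun kv => (kv.1.length : Int) * kv.2)
      = (dictAt cs l).values.map (fun v => (l : Int) * v) := by
  rw [show (dictAt cs l).values = (dictAt cs l).items.map (·.2) from rfl, List.map_map]
  apply List.map_congr_left
  intro kv hkv
  have := keys_len cs l hl kv.1 (PySem.Dict.mem_keys_of_mem_items _ hkv)
  simp [this]

theorem tbl_one (cs : List Char) : tbl cs 1 = List.replicate cs.length true := by
  unfold tbl
  rw [PySem.List.pyRange_zero_natCast]
  rw [List.map_map]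
  rw [show ((fun i => palb cs i.toNat 1) ∘ fun k : Nat => ((k:Nat):Int)) = fun _ => true from
    funext fun j => palb_one cs _]
  simp [List.map_const']

theorem cur_eq (cs : List Char) (l : Nat) (pp : List Bool) (h1 : 1 ≤ l) (hl : l ≤ cs.length)
    (hpp : 3 ≤ l → pp = tbl cs (l - 2)) :
    (if (l : Int) = 1 then List.replicate ((cs.length : Int) - (l : Int) + 1).toNat true
     else if (l : Int) = 2 then
       (PySem.List.pyRange 0 ((cs.length : Int) - (l : Int) + 1)).map (fun i =>
         PySem.List.pyGetD cs i ' ' == PySem.List.pyGetD cs (i + 1) ' ')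
     else
       (PySem.List.pyRange 0 ((cs.length : Int) - (l : Int) + 1)).map (fun i =>
         (PySem.List.pyGetD cs i ' ' == PySem.List.pyGetD cs (i + (l : Int) - 1) ' ')
         && PySem.List.pyGetD pp (i + 1) false)) = tbl cs l := by
  have hm : (cs.length : Int) - (l : Int) + 1 = ((cs.length + 1 - l : Nat) : Int) := by omega
  match l, h1 with
  | 1, _ =>
    rw [if_pos (by norm_num), tbl_one]
    congr 1
    omega
  | 2, _ =>
    rw [if_neg (by norm_num), if_pos (by norm_num)]
    unfold tbl
    rw [hm, PySem.List.pyRange_zero_natCast, List.map_map, List.map_map]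
    apply List.map_congr_left
    intro j hj
    have hj' : j < cs.length + 1 - 2 := List.mem_range.1 hj
    simp only [Function.comp]
    rw [show ((j:Nat):Int).toNat = j by simp]
    rw [palb_rec cs j 2 le_rfl (by omega)]
    rw [show ((j:Nat):Int) + 1 = ((j+1 : Nat) : Int) by push_cast; ring]
    rw [PySem.List.pyGetD_natCast, PySem.List.pyGetD_natCast]
    simp [palb]
  | (r+3), _ =>
    have h3 : 3 ≤ r + 3 := by omega
    rw [if_neg (by omega), if_neg (by omega)]
    unfold tbl
    rw [hm, PySem.List.pyRange_zero_natCast, List.map_map, List.map_map]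
    apply List.map_congr_left
    intro j hj
    have hj' : j < cs.length + 1 - (r+3) := List.mem_range.1 hj
    simp only [Function.comp]
    rw [show ((j:Nat):Int).toNat = j by simp]
    rw [palb_rec cs j (r+3) (by omega) (by omega)]
    rw [show ((j:Nat):Int) + ((r+3 : Nat):Int) - 1 = ((j + (r+3) - 1 : Nat) : Int) by push_cast; omega]
    rw [show ((j:Nat):Int) + 1 = ((j+1 : Nat) : Int) by push_cast; ring]
    rw [PySem.List.pyGetD_natCast, PySem.List.pyGetD_natCast]
    rw [hpp h3]
    rw [tbl_get cs (r+3-2) (j+1) (by omega)]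

-- A's outer-loop body, named (n passed explicitly; `pals` is this fold by rfl)
def gA (cs : List Char) (n : Int) (maximum cut : Int) : Int :=
  let lst : PySem.Dict (List Char) Int :=
    (PySem.List.pyRange 0 (n - cut + 1)).foldl (fun lst pos =>
      let prt := PySem.List.slice cs (some pos) (some (cut + pos))
      if PySem.List.slice? prt none none (-1) = some prt then
        let lst := if lst.contains prt then lst else lst.insert prt 0
        lst.insert prt (lst.getD prt 0 + 1)
      else lst) PySem.Dict.empty
  if lst.size ≠ 0 then
    max ((PySem.List.max? (lst.items.map (fun kv => (kv.1.length : Int) * kv.2))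
            (fun x => x)).getD 0) maximum
  else maximum

-- B's outer-loop body, named
def gB (cs : List Char) (n : Int) (st : Int × List Bool × List Bool) (L : Int) :
    Int × List Bool × List Bool :=
  let best := st.1
  let pp := st.2.1
  let m := n - L + 1
  let cur : List Bool :=
    if L = 1 then List.replicate m.toNat true
    else if L = 2 then
      (PySem.List.pyRange 0 m).map (fun i =>
        PySem.List.pyGetD cs i ' ' == PySem.List.pyGetD cs (i + 1) ' ')
    else
      (PySem.List.pyRange 0 m).map (fun i =>
        (PySem.List.pyGetD cs i ' ' == PySem.List.pyGetD cs (i + L - 1) ' ')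
        && PySem.List.pyGetD pp (i + 1) false)
  let counts : PySem.Dict (List Char) Int :=
    (PySem.List.pyRange 0 m).foldl (fun d i =>
      if PySem.List.pyGetD cur i false then
        let sub := PySem.List.slice cs (some i) (some (i + L))
        d.insert sub (d.getD sub 0 + 1)
      else d) PySem.Dict.empty
  let best := if counts.size ≠ 0 then
      max best (L * ((PySem.List.max? counts.values (fun x => x)).getD 0))
    else best
  (best, st.2.2, cur)

theorem pals_eq_fold (s : String) :
    pals s = (PySem.List.pyRange 0 ((s.toList.length : Int) + 1)).foldl
      (gA s.toList (s.toList.length : Int)) 0 := by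
  simp only [pals, PySem.Str.len_eq]; rfl

theorem pals_alt_eq_fold (s : String) :
    pals_alt s = ((PySem.List.pyRange 1 ((s.toList.length : Int) + 1)).foldl
      (gB s.toList (s.toList.length : Int)) (0, [], [])).1 := by
  simp only [pals_alt, PySem.Str.len_eq]; rfl


theorem insert_empty_fold (L : List Nat) :
    ∀ c : Int, (L.foldl (fun d _ => d.insert ([] : List Char) (d.getD [] 0 + 1))
      (PySem.Dict.empty.insert [] c)) = PySem.Dict.empty.insert [] (c + L.length) := by
  induction L with
  | nil => intro c; simp
  | cons x L ih =>
    intro c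
    simp only [List.foldl_cons]
    rw [PySem.Dict.getD_insert_self, PySem.Dict.insert_insert_self, ih]
    congr 1
    simp
    ring

theorem gA_zero (cs : List Char) : gA cs (cs.length : Int) 0 0 = 0 := by
  have hbody : (PySem.List.pyRange 0 ((cs.length : Int) - 0 + 1)).foldl (fun lst pos =>
      let prt := PySem.List.slice cs (some pos) (some (0 + pos))
      if PySem.List.slice? prt none none (-1) = some prt then
        let lst := if lst.contains prt then lst else lst.insert prt 0
        lst.insert prt (lst.getD prt 0 + 1)
      else lst) (PySem.Dict.empty : PySem.Dict (List Char) Int)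
      = PySem.Dict.empty.insert ([] : List Char) (((cs.length + 1 : Nat) : Int)) := by
    rw [show (cs.length : Int) - 0 + 1 = ((cs.length + 1 : Nat) : Int) by push_cast; ring,
        PySem.List.pyRange_zero_natCast, List.foldl_map]
    rw [PySem.List.foldl_congr_mem _ _
      (fun (d : PySem.Dict (List Char) Int) (_ : Nat) => d.insert [] (d.getD [] 0 + 1)) _ ?_]
    · rcases h : List.range (cs.length + 1) with _ | ⟨x, t⟩
      · exact absurd (congrArg List.length h) (by simp)
      · simp only [List.foldl_cons]
        rw [PySem.Dict.getD_empty, insert_empty_fold]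
        congr 1
        have ht : t.length = cs.length := by
          have := congrArg List.length h; simp at this; omega
        rw [ht]
        push_cast
        ring
    · intro d j hj
      have hsl : PySem.List.slice cs (some ((j:Nat):Int)) (some (0 + (j:Int)))
          = ([] : List Char) := by
        rw [zero_add, PySem.List.slice_natCast]
        simp
      simp only [hsl]
      rw [if_pos (show PySem.List.slice? ([] : List Char) none none (-1) = some [] from rfl)]
      exact step_insert' d []
  simp only [gA]
  rw [hbody]
  have hitems : ((PySem.Dict.empty.insert ([] : List Char) ((cs.length + 1 : Nat) : Int)).items)
      = [([], ((cs.length + 1 : Nat) : Int))] :=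
    PySem.Dict.items_insert_of_not_contains _ _ (PySem.Dict.contains_empty _)
  have hsize : (PySem.Dict.empty.insert ([] : List Char) ((cs.length + 1 : Nat) : Int)).size = 1 := by
    show ((PySem.Dict.empty.insert ([] : List Char) ((cs.length + 1 : Nat) : Int)).items).length = 1
    rw [hitems]
    rfl
  rw [if_pos (by rw [hsize]; norm_num)]
  rw [hitems]
  simp [PySem.List.max?_id_cons]

theorem step_eq (cs : List Char) (l : Nat) (b : Int) (pp p : List Bool)
    (h1 : 1 ≤ l) (hl : l ≤ cs.length) (hpp : 3 ≤ l → pp = tbl cs (l - 2)) :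
    gB cs (cs.length : Int) (b, pp, p) (l : Int)
      = (gA cs (cs.length : Int) b (l : Int), p, tbl cs l) := by
  simp only [gB, gA]
  rw [cur_eq cs l pp h1 hl hpp]
  rw [dictB_eq cs l hl, dictA_eq cs l hl]
  by_cases hz : (dictAt cs l).size = 0
  · rw [if_neg (by omega), if_neg (by omega)]
  · have hne : (dictAt cs l).values ≠ [] := by
      intro h
      apply hz
      show (dictAt cs l).items.length = 0
      rw [show (dictAt cs l).values = (dictAt cs l).items.map (·.2) from rfl] at h
      simpa using congrArg List.length h
    rw [if_pos hz, if_pos hz]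
    rw [map_items_values cs l hl,
        max_scale (l : Int) (by positivity) _ hne, max_comm]

theorem main_inv (cs : List Char) (k : Nat) (hk : k ≤ cs.length) :
    (PySem.List.pyRange 1 ((k : Int) + 1)).foldl (gB cs (cs.length : Int)) (0, [], [])
      = ((PySem.List.pyRange 1 ((k : Int) + 1)).foldl (gA cs (cs.length : Int)) 0,
         if 2 ≤ k then tbl cs (k - 1) else [],
         if 1 ≤ k then tbl cs k else []) := by
  induction k with
  | zero =>
    simp [pysem]
  | succ k ih =>
    have hsplit : PySem.List.pyRange 1 (((k+1 : Nat) : Int) + 1)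
        = PySem.List.pyRange 1 ((k : Int) + 1) ++ [((k:Int) + 1)] := by
      rw [PySem.List.pyRange_one_append 1 ((k:Int)+1) (((k+1:Nat):Int)+1) (by omega) (by push_cast; omega)]
      congr 1
      rw [PySem.List.pyRange_one_cons (by push_cast; omega)]
      congr 1
      rw [show ((k:Int) + 1 + 1 : Int) = ((k+1:Nat):Int) + 1 by push_cast; ring]
      simp [pysem]
    rw [hsplit, List.foldl_append, List.foldl_append, ih (by omega)]
    simp only [List.foldl_cons, List.foldl_nil]
    rw [show ((k:Int) + 1) = ((k+1 : Nat) : Int) by push_cast; ring]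
    have hpp' : 3 ≤ k + 1 → (if 2 ≤ k then tbl cs (k - 1) else []) = tbl cs (k + 1 - 2) := by
      intro h3
      rw [if_pos (by omega), show k + 1 - 2 = k - 1 from by omega]
    rw [step_eq cs (k+1) _ _ _ (by omega) (by omega) hpp']
    simp only [Prod.mk.injEq]
    refine ⟨trivial, ?_, ?_⟩
    · rcases Nat.lt_or_ge k 2 with h | h
      · interval_cases k <;> simp
      · rw [if_pos (by omega), if_pos (by omega), show k + 1 - 1 = k from by omega]
    · rw [if_pos (by omega)]

-- ===== VERDICT (by name: the statement is the Claim_ definition above) =====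
theorem pals_spec : Claim_equal_pals := by
  intro s _
  unfold Spec_pals
  rw [pals_eq_fold, pals_alt_eq_fold, main_inv s.toList s.toList.length le_rfl]
  rw [PySem.List.pyRange_one_cons (by omega : (0:Int) < (s.toList.length : Int) + 1)]
  simp only [List.foldl_cons, zero_add]
  rw [gA_zero]
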